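-- pv_equiv track=rewrite | github.com/bgarnaat/codewars_katas | src/python/6kyu/worda10n/worda10n.py | abbreviate2
-- ===== SOURCE A (Python) =====
-- def abbreviate2(s):
--     word = s_out = ''
--     for l in s:
--         if l.isalpha():
--             word += l
--         else:
--             if len(word) >= 4:
--                 s_out += word[0] + str(len(word) - 2) + word[-1]
--             else:
--                 s_out += word
--             s_out += l
--             word = ''
--     if len(word) >= 4:
--         s_out += word[0] + str(len(word) - 2) + word[-1]
--     else:
--         s_out += word
--     return s_out
-- ===== SOURCE B (Python) =====
-- def abbreviate2(s):
--     out = []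
--     i = 0
--     n = len(s)
--     while i < n:
--         if s[i].isalpha():
--             j = i
--             while j < n and s[j].isalpha():
--                 j += 1
--             run = s[i:j]
--             out.append(run[0] + str(len(run) - 2) + run[-1] if len(run) >= 4 else run)
--             i = j
--         else:
--             out.append(s[i])
--             i += 1
--     return ''.join(out)
-- ===== Notes on version B (the rewrite author's own statement) =====
-- stated objective: alternative
-- what changed: Replaces the char-by-char accumulate-and-flush loop with a run-scanning pass: an index pointer jumps over each maximal alphabetic run at once, abbreviates it in place, and pieces are joined at the end.
import Mathlib
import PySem

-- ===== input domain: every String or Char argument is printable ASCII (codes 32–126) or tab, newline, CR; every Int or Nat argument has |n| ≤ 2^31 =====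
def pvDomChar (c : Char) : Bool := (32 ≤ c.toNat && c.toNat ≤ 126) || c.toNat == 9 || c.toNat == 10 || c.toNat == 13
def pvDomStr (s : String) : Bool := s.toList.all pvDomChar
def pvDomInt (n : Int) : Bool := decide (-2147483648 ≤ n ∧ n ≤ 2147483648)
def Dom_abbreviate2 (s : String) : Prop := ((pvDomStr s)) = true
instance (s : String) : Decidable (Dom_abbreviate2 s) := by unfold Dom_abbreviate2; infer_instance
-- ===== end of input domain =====

-- B replaces A's char-by-char accumulate-and-flush loop with a run-scanning pass
-- (jump over each maximal alphabetic run, abbreviate it in place); same cost, different structure.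

-- ===== PORT A =====
-- flush of the accumulated word: word[0] + str(len(word)-2) + word[-1] if len >= 4 else word
-- (word[0]/word[-1] only evaluated under len >= 4, where pyGet? is some; getD is unreachable padding)
def pvFlushA (w : List Char) : List Char :=
  if w.length ≥ 4 then
    ((PySem.List.pyGet? w 0).getD ' ') ::
      ((PySem.Int.toStr ((w.length : Int) - 2)).toList ++ [(PySem.List.pyGet? w (-1)).getD ' '])
  else w

def pvLoopA : List Char → List Char → List Char → List Char
  | [], word, s_out => s_out ++ pvFlushA word
  | l :: t, word, s_out =>
    if l.isAlpha then pvLoopA t (word ++ [l]) s_out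
    else pvLoopA t [] (s_out ++ pvFlushA word ++ [l])

def abbreviate2 (s : String) : String := String.ofList (pvLoopA s.toList [] [])

-- ===== PORT B =====
-- run[0] + str(len(run)-2) + run[-1] if len(run) >= 4 else run
def pvAbbrB (w : List Char) : List Char :=
  if w.length ≥ 4 then
    ((PySem.List.pyGet? w 0).getD ' ') ::
      ((PySem.Int.toStr ((w.length : Int) - 2)).toList ++ [(PySem.List.pyGet? w (-1)).getD ' '])
  else w

-- the outer while loop: at an alphabetic position scan off the whole run (inner while = takeWhile/dropWhile)
def pvGoB : List Char → List Char
  | [] => []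
  | c :: t =>
    if h : c.isAlpha then
      pvAbbrB ((c :: t).takeWhile Char.isAlpha) ++ pvGoB ((c :: t).dropWhile Char.isAlpha)
    else c :: pvGoB t
termination_by l => l.length
decreasing_by
  · simp only [List.dropWhile, h]
    exact Nat.lt_succ_of_le (List.length_dropWhile_le _ _)
  · simp

def abbreviate2_alt (s : String) : String := String.ofList (pvGoB s.toList)

-- ===== PRECONDITION & SPEC =====
def Spec_abbreviate2 (s : String) (out : String) : Prop := out = abbreviate2_alt s
instance (s : String) (out : String) : Decidable (Spec_abbreviate2 s out) := by unfold Spec_abbreviate2; infer_instance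

-- ===== CLAIM (what is proved, stated in full; the proofs are below) =====
def Claim_equal_abbreviate2 : Prop := ∀ (s : String), Dom_abbreviate2 s → Spec_abbreviate2 s (abbreviate2 s)

-- ===== LEMMAS AND PROOFS =====

lemma pvSplit (w : List Char) (c : Char) (t : List Char)
    (hw : ∀ x ∈ w, x.isAlpha = true) (hc : c.isAlpha = false) :
    (w ++ c :: t).takeWhile Char.isAlpha = w ∧ (w ++ c :: t).dropWhile Char.isAlpha = c :: t := by
  induction w with
  | nil => simp [List.dropWhile, hc]
  | cons a w ih =>
    have ha : a.isAlpha = true := hw a (by simp)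
    have := ih (fun x hx => hw x (by simp [hx]))
    simp [List.takeWhile, ha, this.1, this.2]

lemma pvGoB_all_alpha (w : List Char) (hw : ∀ x ∈ w, x.isAlpha = true) :
    pvGoB w = pvFlushA w := by
  cases w with
  | nil => simp [pvGoB, pvFlushA]
  | cons c t =>
    have hc : c.isAlpha = true := hw c (by simp)
    have htw : (c :: t).takeWhile Char.isAlpha = c :: t := by
      rw [List.takeWhile_eq_self_iff]; intro x hx; exact hw x hx
    have hdw : (c :: t).dropWhile Char.isAlpha = [] := by
      rw [List.dropWhile_eq_nil_iff]; intro x hx; exact hw x hx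
    rw [pvGoB]
    simp [hc, htw, hdw, pvGoB, pvAbbrB, pvFlushA]

lemma pvLoopA_eq (l : List Char) : ∀ (w out : List Char),
    (∀ x ∈ w, x.isAlpha = true) → pvLoopA l w out = out ++ pvGoB (w ++ l) := by
  induction l with
  | nil =>
    intro w out hw
    simp [pvLoopA, pvGoB_all_alpha w hw]
  | cons c t ih =>
    intro w out hw
    by_cases hc : c.isAlpha
    · rw [pvLoopA]
      simp only [hc, if_true]
      have hw' : ∀ x ∈ w ++ [c], x.isAlpha = true := by
        intro x hx
        rcases List.mem_append.mp hx with h | h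
        · exact hw x h
        · simp at h; subst h; exact hc
      rw [ih (w ++ [c]) out hw']
      simp
    · have hc' : c.isAlpha = false := by simpa using hc
      rw [pvLoopA]
      simp only [hc', Bool.false_eq_true, if_false]
      rw [ih [] _ (by intro x hx; simp at hx)]
      cases w with
      | nil => simp [pvGoB, hc', pvFlushA]
      | cons a u =>
        have ha : a.isAlpha = true := hw a (by simp)
        obtain ⟨h1, h2⟩ := pvSplit (a :: u) c t hw hc'
        conv_rhs => rw [show (a :: u) ++ c :: t = a :: (u ++ c :: t) by simp, pvGoB]
        simp only [ha, dif_pos]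
        rw [show a :: (u ++ c :: t) = (a :: u) ++ c :: t by simp, h1, h2]
        rw [pvGoB]
        simp only [hc', Bool.false_eq_true, dite_false]
        simp [pvAbbrB, pvFlushA]

-- ===== VERDICT (by name: the statement is the Claim_ definition above) =====
theorem abbreviate2_spec : Claim_equal_abbreviate2 := by
  intro s _
  unfold Spec_abbreviate2 abbreviate2 abbreviate2_alt
  rw [pvLoopA_eq s.toList [] [] (by intro x hx; simp at hx)]
  simp
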